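-- pv_equiv track=rewrite | github.com/cacaview/py-claw | src/py_claw/tools/powershell.py | _extract_powershell_command
-- ===== SOURCE A (Python) =====
-- def _extract_powershell_command(command: str) -> str:
--     """Extract the base cmdlet from a PowerShell command string."""
--     stripped = command.strip()
--
--     # Handle semicolon separated commands (take first)
--     if ";" in stripped:
--         stripped = stripped.split(";")[0].strip()
--
--     # Handle pipeline (take first element)
--     if " | " in stripped:
--         stripped = stripped.split(" | ")[0].strip()
--
--     # Handle common operators
--     for sep in (" && ", " || ", " > ", " >> ", " < ", " 2>", " &"):
--         if sep in stripped:
--             stripped = stripped.split(sep)[0].strip()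
--
--     tokens = stripped.split()
--     if not tokens:
--         return ""
--
--     # Handle common aliases
--     first_word = tokens[0].lower()
--     alias_map = {
--         "rm": "Remove-Item", "del": "Remove-Item", "rmdir": "Remove-Item",
--         "cp": "Copy-Item", "copy": "Copy-Item", "cpi": "Copy-Item",
--         "mv": "Move-Item", "move": "Move-Item", "mi": "Move-Item",
--         "mkdir": "New-Item", "md": "New-Item", "ni": "New-Item",
--         "cat": "Get-Content", "gc": "Get-Content", "type": "Get-Content",
--         "ls": "Get-ChildItem", "gci": "Get-ChildItem", "dir": "Get-ChildItem",
--         "cd": "Set-Location", "sl": "Set-Location", "pwd": "Get-Location",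
--         "rmdir": "Remove-Item",
--     }
--     if first_word in alias_map:
--         return alias_map[first_word]
--
--     # Return first token, stripping common prefixes
--     result = tokens[0]
--     if result.startswith("-"):
--         result = tokens[1] if len(tokens) > 1 else ""
--     return result
-- ===== SOURCE B (Python) =====
-- _SEPARATORS = (";", " | ", " && ", " || ", " > ", " >> ", " < ", " 2>", " &")
--
-- _ALIASES = {
--     "rm": "Remove-Item", "del": "Remove-Item", "rmdir": "Remove-Item",
--     "cp": "Copy-Item", "copy": "Copy-Item", "cpi": "Copy-Item",
--     "mv": "Move-Item", "move": "Move-Item", "mi": "Move-Item",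
--     "mkdir": "New-Item", "md": "New-Item", "ni": "New-Item",
--     "cat": "Get-Content", "gc": "Get-Content", "type": "Get-Content",
--     "ls": "Get-ChildItem", "gci": "Get-ChildItem", "dir": "Get-ChildItem",
--     "cd": "Set-Location", "sl": "Set-Location", "pwd": "Get-Location",
-- }
--
--
-- def _extract_powershell_command(command: str) -> str:
--     """Extract the base cmdlet from a PowerShell command string."""
--     s = command.strip()
--     # Each separator's first occurrence in s, computed once up front.
--     first = [(sep, s.find(sep)) for sep in _SEPARATORS]
--     # Boundary index into s: s[:b] is the command core, kept right-stripped.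
--     # A separator occurrence is relevant iff it lies entirely below the boundary.
--     b = len(s)
--     for sep, j in first:
--         if 0 <= j and j + len(sep) <= b:
--             b = j
--             while b > 0 and s[b - 1].isspace():
--                 b -= 1
--     tokens = s[:b].split()
--     if not tokens:
--         return ""
--     head = tokens[0]
--     canonical = _ALIASES.get(head.lower())
--     if canonical is not None:
--         return canonical
--     if not head.startswith("-"):
--         return head
--     return tokens[1] if len(tokens) > 1 else ""
-- ===== Notes on version B (the rewrite author's own statement) =====
-- stated objective: alternative
-- what changed: A repeatedly rebuilds the string (membership test, split, strip at every cascade stage, each re-scanning the current substring); B never rebuilds it: it precomputes each separator's first occurrence in the stripped command once, then runs a pure integer boundary recurrence (occurrence-fits-below-boundary test plus a backward whitespace walk) and slices the string a single time at the end.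
import Mathlib
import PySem

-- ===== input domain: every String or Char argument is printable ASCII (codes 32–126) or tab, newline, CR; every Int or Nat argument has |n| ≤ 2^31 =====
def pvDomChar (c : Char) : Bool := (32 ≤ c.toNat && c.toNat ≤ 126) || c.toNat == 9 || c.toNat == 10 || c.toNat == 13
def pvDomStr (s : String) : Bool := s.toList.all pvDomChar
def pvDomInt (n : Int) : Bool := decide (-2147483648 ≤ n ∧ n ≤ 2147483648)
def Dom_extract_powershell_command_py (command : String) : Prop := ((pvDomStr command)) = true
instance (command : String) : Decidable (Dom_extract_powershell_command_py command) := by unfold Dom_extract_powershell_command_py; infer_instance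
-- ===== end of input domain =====

-- B replaces A's rebuild-the-string cascade (membership test + split + strip per stage) by a
-- precomputed first-occurrence table and an integer boundary recurrence, slicing once at the end
-- (objective: alternative).


-- ===== PORT A =====
-- 'if sep in stripped: stripped = stripped.split(sep)[0].strip()' (written three times in A);
-- split(sep) on nonempty sep always returns a nonempty list, so the [0] is headD.
def pyCutStep (s : String) (sep : String) : String :=
  if PySem.Str.isIn sep s then PySem.Str.strip (((PySem.Str.split? s sep).getD []).headD "") else s

def pyAliasMap : PySem.Dict String String := PySem.Dict.ofList
  [("rm", "Remove-Item"), ("del", "Remove-Item"), ("rmdir", "Remove-Item"),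
   ("cp", "Copy-Item"), ("copy", "Copy-Item"), ("cpi", "Copy-Item"),
   ("mv", "Move-Item"), ("move", "Move-Item"), ("mi", "Move-Item"),
   ("mkdir", "New-Item"), ("md", "New-Item"), ("ni", "New-Item"),
   ("cat", "Get-Content"), ("gc", "Get-Content"), ("type", "Get-Content"),
   ("ls", "Get-ChildItem"), ("gci", "Get-ChildItem"), ("dir", "Get-ChildItem"),
   ("cd", "Set-Location"), ("sl", "Set-Location"), ("pwd", "Get-Location"),
   ("rmdir", "Remove-Item")]

def extract_powershell_command_py (command : String) : String :=
  let stripped := PySem.Str.strip command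
  let stripped := pyCutStep stripped ";"
  let stripped := pyCutStep stripped " | "
  let stripped := [" && ", " || ", " > ", " >> ", " < ", " 2>", " &"].foldl pyCutStep stripped
  let tokens := PySem.Str.split₀ stripped
  if tokens.isEmpty then ""
  else
    let first_word := PySem.Str.lower (PySem.List.pyGetD tokens 0 "")
    if pyAliasMap.contains first_word then (pyAliasMap.get? first_word).getD ""
    else
      let result := PySem.List.pyGetD tokens 0 ""
      if PySem.Str.startswith result "-" then
        (if 1 < tokens.length then PySem.List.pyGetD tokens 1 "" else "")
      else result

-- ===== PORT B =====
def pvSeparators : List String := [";", " | ", " && ", " || ", " > ", " >> ", " < ", " 2>", " &"]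

def pvAliases : PySem.Dict String String := PySem.Dict.ofList
  [("rm", "Remove-Item"), ("del", "Remove-Item"), ("rmdir", "Remove-Item"),
   ("cp", "Copy-Item"), ("copy", "Copy-Item"), ("cpi", "Copy-Item"),
   ("mv", "Move-Item"), ("move", "Move-Item"), ("mi", "Move-Item"),
   ("mkdir", "New-Item"), ("md", "New-Item"), ("ni", "New-Item"),
   ("cat", "Get-Content"), ("gc", "Get-Content"), ("type", "Get-Content"),
   ("ls", "Get-ChildItem"), ("gci", "Get-ChildItem"), ("dir", "Get-ChildItem"),
   ("cd", "Set-Location"), ("sl", "Set-Location"), ("pwd", "Get-Location")]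

-- Source B's 'while b > 0 and s[b - 1].isspace(): b -= 1'
def pvRstripIdx (cs : List Char) : Nat → Nat
  | 0 => 0
  | b + 1 => if PySem.Chars.isspace (cs.getD b ' ') then pvRstripIdx cs b else b + 1

def extract_powershell_command_py_alt (command : String) : String :=
  let s := PySem.Str.strip command
  -- first = [(sep, s.find(sep)) for sep in _SEPARATORS]
  let first := pvSeparators.map (fun sep => (sep, PySem.Str.find s sep))
  -- integer boundary recurrence over the precomputed occurrence table
  let b := first.foldl
    (fun b e => if 0 ≤ e.2 ∧ e.2 + PySem.Str.len e.1 ≤ (b : Int)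
                then pvRstripIdx s.toList e.2.toNat else b)
    s.toList.length
  match PySem.Str.split₀ (PySem.Str.slice s none (some (b : Int))) with
  | [] => ""
  | head :: rest =>
    match pvAliases.get? (PySem.Str.lower head) with
    | some canonical => canonical
    | none =>
      if !(PySem.Str.startswith head "-") then head
      else match rest with
           | [] => ""
           | second :: _ => second

-- ===== PRECONDITION & SPEC =====
def Spec_extract_powershell_command_py (command : String) (out : String) : Prop := out = extract_powershell_command_py_alt command
instance (command : String) (out : String) : Decidable (Spec_extract_powershell_command_py command out) := by unfold Spec_extract_powershell_command_py; infer_instance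

-- ===== CLAIM (what is proved, stated in full; the proofs are below) =====
def Claim_equal_extract_powershell_command_py : Prop := ∀ (command : String), Dom_extract_powershell_command_py command → Spec_extract_powershell_command_py command (extract_powershell_command_py command)

-- ===== LEMMAS AND PROOFS =====

-- Proof-side bridge: A's cut step rephrased through find/slice (pv_cut_eq below),
-- and B's boundary update rephrased as a function of the separator (pv_step_eq below).
def pvCut (s : String) (sep : String) : String :=
  if PySem.Str.find s sep == -1 then s
  else PySem.Str.strip (PySem.Str.slice s none (some (PySem.Str.find s sep)))

def pvStep (cs : List Char) (b : Nat) (sep : String) : Nat :=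
  if 0 ≤ PySem.Chars.find cs sep.toList ∧
      PySem.Chars.find cs sep.toList + (sep.toList.length : Int) ≤ (b : Int)
  then pvRstripIdx cs (PySem.Chars.find cs sep.toList).toNat else b

theorem pv_dropWhile_idem (p : Char → Bool) (l : List Char) :
    List.dropWhile p (List.dropWhile p l) = List.dropWhile p l := by
  induction l with
  | nil => simp
  | cons c t ih =>
    rw [List.dropWhile_cons]
    by_cases hc : p c
    · simp [hc, ih]
    · simp [hc]

-- splitOn.go prepends the accumulator (reversed) to its result.
theorem pv_splitOn_go_acc (sep : List Char) : ∀ (fuel : Nat) (l cur : List Char) (acc : List (List Char)),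
    PySem.Chars.splitOn.go sep fuel l cur acc = acc.reverse ++ PySem.Chars.splitOn.go sep fuel l cur [] := by
  intro fuel
  induction fuel with
  | zero => intro l cur acc; rw [PySem.Chars.splitOn.go.eq_def, PySem.Chars.splitOn.go.eq_def]; simp
  | succ f ih =>
    intro l cur acc
    rw [PySem.Chars.splitOn.go.eq_def]
    conv_rhs => rw [PySem.Chars.splitOn.go.eq_def]
    rcases l with _ | ⟨c, rest⟩
    · simp
    · by_cases hp : sep.isPrefixOf (c :: rest)
      · simp only [hp, if_true]
        rw [ih _ _ (cur.reverse :: acc), ih _ _ ([cur.reverse])]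
        simp
      · simp only [hp, Bool.false_eq_true, if_false]
        exact ih rest (c :: cur) acc

theorem pv_find_go_shift (sub : List Char) : ∀ (l : List Char) (k : Nat),
    PySem.Chars.find.go sub l k =
      if PySem.Chars.find.go sub l 0 = -1 then -1 else PySem.Chars.find.go sub l 0 + k := by
  intro l
  induction l with
  | nil => intro k; rw [PySem.Chars.find.go.eq_def]; conv_rhs => rw [PySem.Chars.find.go.eq_def]
           by_cases h : sub.isEmpty <;> simp [h]
  | cons c rest ih =>
    intro k
    rw [PySem.Chars.find.go.eq_def]
    conv_rhs => rw [PySem.Chars.find.go.eq_def]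
    by_cases hp : sub.isPrefixOf (c :: rest)
    · simp [hp]
    · simp only [hp, Bool.false_eq_true, if_false]
      rw [ih (k+1), ih 1]
      have hlb : -1 ≤ PySem.Chars.find.go sub rest 0 := PySem.Chars.neg_one_le_find rest sub
      by_cases h0 : PySem.Chars.find.go sub rest 0 = -1 <;> simp [h0] <;> omega

theorem pv_splitOn_go_headD (sep : List Char) (hsep : sep ≠ []) : ∀ (fuel : Nat) (l cur : List Char),
    l.length < fuel →
    (PySem.Chars.splitOn.go sep fuel l cur []).headD [] =
      cur.reverse ++ (if PySem.Chars.find l sep = -1 then l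
                      else l.take (PySem.Chars.find l sep).toNat) := by
  intro fuel
  induction fuel with
  | zero => intro l cur h; omega
  | succ f ih =>
    intro l cur h
    rw [PySem.Chars.splitOn.go.eq_def]
    rcases l with _ | ⟨c, rest⟩
    · simp [PySem.Chars.find, PySem.Chars.find.go, List.isEmpty_iff, hsep]
    · by_cases hp : sep.isPrefixOf (c :: rest)
      · simp only [hp, if_true]
        rw [pv_splitOn_go_acc]
        have hf : PySem.Chars.find (c :: rest) sep = 0 := by
          simp [PySem.Chars.find]
          rw [PySem.Chars.find.go.eq_def]
          simp [hp]
        simp [hf]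
      · simp only [hp, Bool.false_eq_true, if_false]
        rw [ih rest (c :: cur) (by simpa using Nat.lt_of_succ_lt_succ h)]
        have hstep : PySem.Chars.find (c :: rest) sep =
            if PySem.Chars.find rest sep = -1 then -1 else PySem.Chars.find rest sep + 1 := by
          simp only [PySem.Chars.find]
          rw [PySem.Chars.find.go.eq_def]
          simp only [hp, Bool.false_eq_true, if_false]
          exact pv_find_go_shift sep rest 1
        have hlb : -1 ≤ PySem.Chars.find rest sep := PySem.Chars.neg_one_le_find rest sep
        by_cases h0 : PySem.Chars.find rest sep = -1
        · simp [hstep, h0]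
        · have hge : 0 ≤ PySem.Chars.find rest sep := by omega
          rw [hstep]
          simp only [h0, if_false]
          have : ¬ (PySem.Chars.find rest sep + 1 = -1) := by omega
          simp only [this, if_false]
          have htn : (PySem.Chars.find rest sep + 1).toNat = (PySem.Chars.find rest sep).toNat + 1 := by omega
          simp [htn]

theorem pv_cut_eq (sep : String) (hsep : sep.toList ≠ []) (s : String) :
    pyCutStep s sep = pvCut s sep := by
  unfold pyCutStep pvCut
  simp only [PySem.Str.isIn, PySem.Chars.isIn, PySem.Str.find]
  have hlb : -1 ≤ PySem.Chars.find s.toList sep.toList := PySem.Chars.neg_one_le_find _ _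
  by_cases h : PySem.Chars.find s.toList sep.toList = -1
  · simp [h]
  · have hne : (PySem.Chars.find s.toList sep.toList != -1) = true := by simp [h]
    have heq : (PySem.Chars.find s.toList sep.toList == -1) = false := by simp [h]
    simp only [hne, heq, if_true, Bool.false_eq_true, if_false]
    have hnonneg : 0 ≤ PySem.Chars.find s.toList sep.toList := by omega
    have hsplit : PySem.Str.split? s sep =
        some ((PySem.Chars.splitOn s.toList sep.toList).map String.ofList) := by
      simp [PySem.Str.split?, PySem.Chars.split?, List.isEmpty_iff, hsep]
    rw [hsplit]
    have hhead : (PySem.Chars.splitOn s.toList sep.toList).headD [] =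
        s.toList.take (PySem.Chars.find s.toList sep.toList).toNat := by
      rw [PySem.Chars.splitOn]
      rw [pv_splitOn_go_headD sep.toList hsep (s.toList.length + 1) s.toList [] (by omega)]
      simp [h]
    have hmap : ((PySem.Chars.splitOn s.toList sep.toList).map String.ofList).headD "" =
        String.ofList ((PySem.Chars.splitOn s.toList sep.toList).headD []) := by
      rcases hL : PySem.Chars.splitOn s.toList sep.toList with _ | ⟨hd, tl⟩ <;> simp
    rw [Option.getD_some, hmap, hhead]
    have hslice : PySem.Chars.slice s.toList none (some (PySem.Chars.find s.toList sep.toList)) =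
        s.toList.take (PySem.Chars.find s.toList sep.toList).toNat := by
      rw [PySem.Chars.slice_eq_listSlice]
      exact PySem.List.slice_to s.toList hnonneg
    rw [PySem.Str.slice, hslice]

theorem pv_chain_eq (t : String) :
    [" && ", " || ", " > ", " >> ", " < ", " 2>", " &"].foldl pyCutStep (pyCutStep (pyCutStep t ";") " | ")
      = pvSeparators.foldl pvCut t := by
  have h9 : [" && ", " || ", " > ", " >> ", " < ", " 2>", " &"].foldl pyCutStep (pyCutStep (pyCutStep t ";") " | ")
      = pvSeparators.foldl pyCutStep t := by
    simp [pvSeparators, List.foldl_cons]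
  rw [h9]
  refine PySem.List.foldl_congr_mem pvSeparators pyCutStep pvCut t ?_
  intro acc x hx
  refine pv_cut_eq x ?_ acc
  fin_cases hx <;> decide

-- find restricted to a prefix: the global first occurrence, if it fits below b, else absent.
theorem pv_prefix_take (sub l : List Char) (m : Nat) (h : sub <+: l) (hm : sub.length ≤ m) :
    sub <+: l.take m :=
  List.prefix_take_iff.mpr ⟨h, hm⟩

theorem pv_find_take (cs sub : List Char) (hsub : sub ≠ []) (b : Nat) :
    PySem.Chars.find (cs.take b) sub =
      if 0 ≤ PySem.Chars.find cs sub ∧ PySem.Chars.find cs sub + (sub.length : Int) ≤ (b : Int)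
      then PySem.Chars.find cs sub else -1 := by
  by_cases hcond : 0 ≤ PySem.Chars.find cs sub ∧
      PySem.Chars.find cs sub + (sub.length : Int) ≤ (b : Int)
  · rw [if_pos hcond]
    obtain ⟨hpre, hmin⟩ := PySem.Chars.find_spec hcond.1
    have hpre' : sub <+: (cs.take b).drop (PySem.Chars.find cs sub).toNat := by
      rw [List.drop_take]
      exact pv_prefix_take _ _ _ hpre (by omega)
    have hg0 : 0 ≤ PySem.Chars.find (cs.take b) sub :=
      (PySem.Chars.find_nonneg_iff _ _).mpr ((PySem.Chars.isIn_iff_infix _ _).mp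
        ((PySem.Chars.exists_prefix_drop_iff_isIn _ _).mp ⟨_, hpre'⟩))
    obtain ⟨gpre, gmin⟩ := PySem.Chars.find_spec hg0
    have h1 : ¬ (PySem.Chars.find cs sub).toNat < (PySem.Chars.find (cs.take b) sub).toNat :=
      fun hlt => gmin _ hlt hpre'
    have h2 : ¬ (PySem.Chars.find (cs.take b) sub).toNat < (PySem.Chars.find cs sub).toNat := by
      intro hlt
      refine hmin _ hlt ?_
      rw [List.drop_take] at gpre
      exact gpre.trans (List.take_prefix _ _)
    omega
  · rw [if_neg hcond]
    apply (PySem.Chars.find_eq_neg_one_iff _ _).mpr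
    intro hinf
    obtain ⟨j, hj⟩ := (PySem.Chars.exists_prefix_drop_iff_isIn _ _).mpr
      ((PySem.Chars.isIn_iff_infix _ _).mpr hinf)
    rw [List.drop_take] at hj
    have hj' : sub <+: cs.drop j := hj.trans (List.take_prefix _ _)
    have hlen : sub.length ≤ b - j := by
      have := hj.length_le
      simp [List.length_take, List.length_drop] at this
      omega
    have hjb : j + sub.length ≤ b := by
      have hpos : 0 < sub.length := List.length_pos_iff.mpr hsub
      omega
    have hf0 : 0 ≤ PySem.Chars.find cs sub :=
      (PySem.Chars.find_nonneg_iff _ _).mpr ((PySem.Chars.isIn_iff_infix _ _).mp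
        ((PySem.Chars.exists_prefix_drop_iff_isIn _ _).mp ⟨j, hj'⟩))
    have hfle : ¬ j < (PySem.Chars.find cs sub).toNat := fun h => (PySem.Chars.find_spec hf0).2 j h hj'
    exact hcond ⟨hf0, by omega⟩

theorem pv_rstrip_idx_le (cs : List Char) : ∀ j, pvRstripIdx cs j ≤ j := by
  intro j
  induction j with
  | zero => simp [pvRstripIdx]
  | succ n ih =>
    rw [pvRstripIdx]
    split <;> omega

theorem pv_rstrip_take (cs : List Char) : ∀ j, j ≤ cs.length →
    PySem.Chars.rstrip (cs.take j) = cs.take (pvRstripIdx cs j) := by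
  intro j
  induction j with
  | zero => intro _; simp [PySem.Chars.rstrip, pvRstripIdx]
  | succ n ih =>
    intro h
    have hn : n < cs.length := by omega
    have htake : cs.take (n + 1) = cs.take n ++ [cs[n]] := by
      rw [List.take_add_one]
      simp [List.getElem?_eq_getElem hn]
    rw [pvRstripIdx, List.getD_eq_getElem cs ' ' hn]
    by_cases hsp : PySem.Chars.isspace cs[n]
    · rw [if_pos hsp, ← ih (by omega), htake]
      simp only [PySem.Chars.rstrip, List.reverse_append, List.reverse_cons, List.reverse_nil,
        List.nil_append, List.cons_append, List.dropWhile_cons, hsp]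
      simp
    · rw [if_neg hsp, htake]
      simp only [PySem.Chars.rstrip, List.reverse_append, List.reverse_cons, List.reverse_nil,
        List.nil_append, List.cons_append, List.dropWhile_cons, hsp]
      simp

theorem pv_head_not_space (c : Char) (l : List Char)
    (h : PySem.Chars.lstrip (c :: l) = c :: l) : PySem.Chars.isspace c = false := by
  by_cases hsp : PySem.Chars.isspace c
  · exfalso
    unfold PySem.Chars.lstrip at h
    rw [List.dropWhile_cons, if_pos hsp] at h
    have hle : (l.dropWhile PySem.Chars.isspace).length ≤ l.length := List.length_dropWhile_le _ _
    have := congrArg List.length h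
    simp at this
    omega
  · simpa using hsp

theorem pv_lstrip_take (cs : List Char) (hl : PySem.Chars.lstrip cs = cs) (j : Nat) :
    PySem.Chars.lstrip (cs.take j) = cs.take j := by
  rcases cs with _ | ⟨c, tl⟩
  · simp [PySem.Chars.lstrip]
  · rcases j with _ | n
    · simp [PySem.Chars.lstrip]
    · have hc : PySem.Chars.isspace c = false := pv_head_not_space c tl hl
      simp [PySem.Chars.lstrip, hc]

theorem pv_strip_take (cs : List Char) (hl : PySem.Chars.lstrip cs = cs) (j : Nat)
    (hj : j ≤ cs.length) :
    PySem.Chars.strip (cs.take j) = cs.take (pvRstripIdx cs j) := by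
  unfold PySem.Chars.strip
  rw [pv_lstrip_take cs hl j]
  exact pv_rstrip_take cs j hj

theorem pv_lstrip_strip (x : List Char) :
    PySem.Chars.lstrip (PySem.Chars.strip x) = PySem.Chars.strip x := by
  unfold PySem.Chars.strip
  have hm : PySem.Chars.lstrip (PySem.Chars.lstrip x) = PySem.Chars.lstrip x := by
    unfold PySem.Chars.lstrip
    exact pv_dropWhile_idem PySem.Chars.isspace x
  generalize PySem.Chars.lstrip x = m at hm
  have hpre : PySem.Chars.rstrip m <+: m := by
    unfold PySem.Chars.rstrip
    simpa using List.reverse_prefix.mpr (List.dropWhile_suffix (l := m.reverse) PySem.Chars.isspace)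
  rcases hr : PySem.Chars.rstrip m with _ | ⟨c, t⟩
  · simp [PySem.Chars.lstrip]
  · rw [hr] at hpre
    obtain ⟨r, hrr⟩ := hpre
    have hc : PySem.Chars.isspace c = false := by
      apply pv_head_not_space c (t ++ r)
      rw [← List.cons_append, hrr]
      exact hm
    simp [PySem.Chars.lstrip, hc]

theorem pv_cut_take (cs : List Char) (hl : PySem.Chars.lstrip cs = cs) (b : Nat)
    (hb : b ≤ cs.length) (sep : String) (hsep : sep.toList ≠ []) :
    pvCut (String.ofList (cs.take b)) sep = String.ofList (cs.take (pvStep cs b sep)) := by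
  unfold pvCut pvStep
  have hfind : PySem.Str.find (String.ofList (cs.take b)) sep = PySem.Chars.find (cs.take b) sep.toList := by
    simp [PySem.Str.find]
  rw [hfind, pv_find_take cs sep.toList hsep b]
  by_cases hcond : 0 ≤ PySem.Chars.find cs sep.toList ∧
      PySem.Chars.find cs sep.toList + (sep.toList.length : Int) ≤ (b : Int)
  · rw [if_pos hcond, if_pos hcond]
    have hne : (PySem.Chars.find cs sep.toList == -1) = false := by
      have := hcond.1; simp; omega
    rw [hne]
    simp only [Bool.false_eq_true, if_false]
    have hfb : (PySem.Chars.find cs sep.toList).toNat ≤ b := by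
      have hpos : 0 < sep.toList.length := List.length_pos_iff.mpr hsep
      omega
    have hfl : (PySem.Chars.find cs sep.toList).toNat ≤ cs.length := by
      have := PySem.Chars.find_le_length cs sep.toList
      omega
    have hslice : PySem.Str.slice (String.ofList (cs.take b)) none (some (PySem.Chars.find cs sep.toList)) =
        String.ofList (cs.take (PySem.Chars.find cs sep.toList).toNat) := by
      rw [PySem.Str.slice]
      congr 1
      rw [String.toList_ofList, PySem.Chars.slice_eq_listSlice,
        PySem.List.slice_to _ hcond.1, List.take_take]
      congr 1
      omega
    rw [hslice, PySem.Str.strip, String.toList_ofList,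
      pv_strip_take cs hl _ hfl]
  · rw [if_neg hcond, if_neg hcond]
    simp

theorem pv_step_le (cs : List Char) (b : Nat) (hb : b ≤ cs.length) (sep : String) :
    pvStep cs b sep ≤ cs.length := by
  unfold pvStep
  split
  · rename_i hcond
    have h1 := pv_rstrip_idx_le cs (PySem.Chars.find cs sep.toList).toNat
    have h2 := PySem.Chars.find_le_length cs sep.toList
    omega
  · exact hb

theorem pv_fold_bridge (cs : List Char) (hl : PySem.Chars.lstrip cs = cs) :
    ∀ (seps : List String) (b : Nat), (∀ t ∈ seps, t.toList ≠ []) → b ≤ cs.length →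
    seps.foldl pvCut (String.ofList (cs.take b)) =
      String.ofList (cs.take (seps.foldl (pvStep cs) b)) := by
  intro seps
  induction seps with
  | nil => intro b _ _; simp
  | cons t ts ih =>
    intro b hne hb
    rw [List.foldl_cons, List.foldl_cons,
      pv_cut_take cs hl b hb t (hne t (List.mem_cons_self))]
    exact ih (pvStep cs b t) (fun x hx => hne x (List.mem_cons_of_mem t hx))
      (pv_step_le cs b hb t)

theorem pv_fold_cast (f : Int → String → Int) (g : Nat → String → Nat)
    (h : ∀ (b : Nat) (x : String), f (b : Int) x = ((g b x : Nat) : Int)) :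
    ∀ (seps : List String) (b : Nat), seps.foldl f (b : Int) = ((seps.foldl g b : Nat) : Int) := by
  intro seps
  induction seps with
  | nil => intro b; rfl
  | cons x t ih => intro b; rw [List.foldl_cons, List.foldl_cons, h b x, ih]

theorem pv_cores_eq (s : String) (hl : PySem.Chars.lstrip s.toList = s.toList) :
    pvSeparators.foldl pvCut s =
      PySem.Str.slice s none
        (some ((pvSeparators.map (fun sep => (sep, PySem.Str.find s sep))).foldl
          (fun b e => if 0 ≤ e.2 ∧ e.2 + PySem.Str.len e.1 ≤ b
                      then ((pvRstripIdx s.toList e.2.toNat : Nat) : Int) else b)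
          ((s.toList.length : Nat) : Int))) := by
  have hI : (pvSeparators.map (fun sep => (sep, PySem.Str.find s sep))).foldl
      (fun b e => if 0 ≤ e.2 ∧ e.2 + PySem.Str.len e.1 ≤ b
                  then ((pvRstripIdx s.toList e.2.toNat : Nat) : Int) else b)
      ((s.toList.length : Nat) : Int) =
      ((pvSeparators.foldl (pvStep s.toList) s.toList.length : Nat) : Int) := by
    rw [List.foldl_map]
    refine pv_fold_cast _ (pvStep s.toList) ?_ pvSeparators s.toList.length
    intro b x
    simp only [pvStep, PySem.Str.find, PySem.Str.len]
    split_ifs <;> rfl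
  rw [hI]
  have hs : String.ofList (s.toList.take s.toList.length) = s := by
    rw [List.take_length, String.ofList_toList]
  conv_lhs => rw [← hs]
  rw [pv_fold_bridge s.toList hl pvSeparators s.toList.length (by decide) (le_refl _)]
  rw [PySem.Str.slice]
  congr 1
  rw [PySem.Chars.slice_eq_listSlice, PySem.List.slice_to_natCast]

theorem pv_dicts_eq : pyAliasMap = pvAliases := by decide

theorem extract_powershell_command_py_spec_aux (command : String) :
    extract_powershell_command_py command = extract_powershell_command_py_alt command := by
  unfold extract_powershell_command_py extract_powershell_command_py_alt
  dsimp only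
  have hl : PySem.Chars.lstrip (PySem.Str.strip command).toList = (PySem.Str.strip command).toList := by
    rw [PySem.Str.strip, String.toList_ofList]
    exact pv_lstrip_strip command.toList
  rw [pv_chain_eq (PySem.Str.strip command), pv_cores_eq _ hl]
  rcases htok : PySem.Str.split₀ (PySem.Str.slice (PySem.Str.strip command) none
      (some ((pvSeparators.map (fun sep => (sep, PySem.Str.find (PySem.Str.strip command) sep))).foldl
        (fun b e => if 0 ≤ e.2 ∧ e.2 + PySem.Str.len e.1 ≤ b
                    then ((pvRstripIdx (PySem.Str.strip command).toList e.2.toNat : Nat) : Int) else b)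
        (((PySem.Str.strip command).toList.length : Nat) : Int)))) with _ | ⟨head, rest⟩
  · rw [htok]
    simp
  · rw [htok]
    simp only [List.isEmpty_cons, Bool.false_eq_true, if_false]
    have h0 : PySem.List.pyGetD (head :: rest) 0 "" = head := by
      simp [PySem.List.pyGetD, PySem.List.pyGet?, PySem.List.pyIdx?]
    rw [h0, pv_dicts_eq]
    rcases hg : pvAliases.get? (PySem.Str.lower head) with _ | v
    · have hc : pvAliases.contains (PySem.Str.lower head) = false :=
        (PySem.Dict.get?_eq_none_iff_contains pvAliases (PySem.Str.lower head)).mp hg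
      rw [hc]
      simp only [Bool.false_eq_true, if_false]
      by_cases hd : PySem.Str.startswith head "-" = true
      · rw [PySem.Str.startswith] at hd
        simp only [PySem.Str.startswith, hd, if_true, Bool.not_true, Bool.false_eq_true, if_false]
        rcases rest with _ | ⟨second, rest'⟩
        · simp
        · have h1 : 1 < (head :: second :: rest').length := by simp
          simp only [h1, if_true]
          simp [PySem.List.pyGetD, PySem.List.pyGet?, PySem.List.pyIdx?]
      · rw [PySem.Str.startswith] at hd
        have hd' : PySem.Chars.startswith head.toList ['-'] = false := by
          cases hcs : PySem.Chars.startswith head.toList ['-'] with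
          | false => rfl
          | true => exact absurd hcs hd
        simp [hd']
    · have hc : pvAliases.contains (PySem.Str.lower head) = true := by
        by_contra hcc
        have := (PySem.Dict.get?_eq_none_iff_contains pvAliases (PySem.Str.lower head)).mpr
          (by revert hcc; cases pvAliases.contains (PySem.Str.lower head) <;> simp)
        rw [hg] at this; exact (Option.some_ne_none v this)
      rw [hc]
      simp

-- ===== VERDICT (by name: the statement is the Claim_ definition above) =====
theorem extract_powershell_command_py_spec : Claim_equal_extract_powershell_command_py := by
  intro command _
  exact extract_powershell_command_py_spec_aux command
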